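-- pv_equiv track=rewrite | github.com/indrajitjoshi/NEW-PROJECT- | NEW EMOTION.py | get_recommendation_and_comment
-- ===== SOURCE A (Python) =====
-- from collections import Counter
--
-- def get_recommendation_and_comment(all_emotions):
--     """
--     Determines the overall recommended emotion and the buy/no-buy comment.
--     Tie-breaking logic: If there's a tie for the highest count, use the emotion from the LAST review (index 9).
--     """
--     if not all_emotions:
--         return "N/A", "Please enter at least one review for analysis.", {}
--
--     emotion_counts = Counter(all_emotions)
--
--     # 1. Find the maximum count
--     max_count = max(emotion_counts.values())
--
--     # 2. Find all emotions that share the maximum count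
--     top_emotions = [emotion for emotion, count in emotion_counts.items() if count == max_count]
--
--     # 3. Determine the final dominant emotion (Tie-breaking: use the last review's emotion)
--     dominant_emotion = top_emotions[0] # Default choice
--
--     if len(top_emotions) > 1:
--         last_review_emotion = all_emotions[-1]
--         if last_review_emotion in top_emotions:
--             dominant_emotion = last_review_emotion
--         # If the last review emotion wasn't part of the tie, we stick to the default (alphabetically first)
--
--     # 4. Generate Comment
--     # We must consider 'Surprise' as ambiguous. Only 'Joy' and 'Love' are strong BUY signals.
--     positive_buy_emotions = ['Joy', 'Love']
--
--     if dominant_emotion in positive_buy_emotions: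
--         comment = (
--             f"**Recommendation: BUY!** The dominant sentiment is strongly positive ({dominant_emotion}), "
--             "indicating a highly satisfied customer base. This is a strong indicator of product quality."
--         )
--     elif dominant_emotion == 'Surprise':
--         comment = (
--             f"**Recommendation: CAUTIOUS BUY.** The dominant sentiment is 'Surprise'. While positive, "
--             "it suggests a wide range of unexpected outcomes. Review customer feedback carefully."
--         )
--     else:
--         # Sadness, Anger, Fear
--         comment = (
--             f"**Recommendation: DO NOT BUY.** The dominant sentiment is negative ({dominant_emotion}), "
--             "suggesting significant customer dissatisfaction or potential product issues. Caution is advised."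
--         )
--
--     return dominant_emotion, comment, emotion_counts
-- ===== SOURCE B (Python) =====
-- def _comment(dominant):
--     if dominant in ('Joy', 'Love'):
--         return (
--             f"**Recommendation: BUY!** The dominant sentiment is strongly positive ({dominant}), "
--             "indicating a highly satisfied customer base. This is a strong indicator of product quality."
--         )
--     if dominant == 'Surprise':
--         return (
--             "**Recommendation: CAUTIOUS BUY.** The dominant sentiment is 'Surprise'. While positive, "
--             "it suggests a wide range of unexpected outcomes. Review customer feedback carefully."
--         )
--     return (
--         f"**Recommendation: DO NOT BUY.** The dominant sentiment is negative ({dominant}), "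
--         "suggesting significant customer dissatisfaction or potential product issues. Caution is advised."
--     )
--
--
-- def get_recommendation_and_comment(all_emotions):
--     if not all_emotions:
--         return "N/A", "Please enter at least one review for analysis.", {}
--
--     counts = {}
--     for e in all_emotions:
--         counts[e] = counts.get(e, 0) + 1
--
--     # argmax scan seeded with the last review's emotion: an emotion only
--     # displaces the seed by a STRICTLY larger count, so the last review wins
--     # every tie it takes part in and the first-appearing strict maximum wins
--     # otherwise -- exactly A's tie-breaking, with no max()/top-list/membership.
--     last = all_emotions[-1]
--     dominant, best = last, counts[last]
--     for e, c in counts.items():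
--         if best < c:
--             dominant, best = e, c
--
--     return dominant, _comment(dominant), counts
-- ===== Notes on version B (the rewrite author's own statement) =====
-- stated objective: simpler
-- what changed: B drops Counter, max(), the top_emotions list and the membership tie-break: after one counting pass it picks the dominant emotion by a strict-improvement argmax fold over the dict seeded with the last review's emotion, so the tie-break is implicit in the seed.
import Mathlib
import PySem

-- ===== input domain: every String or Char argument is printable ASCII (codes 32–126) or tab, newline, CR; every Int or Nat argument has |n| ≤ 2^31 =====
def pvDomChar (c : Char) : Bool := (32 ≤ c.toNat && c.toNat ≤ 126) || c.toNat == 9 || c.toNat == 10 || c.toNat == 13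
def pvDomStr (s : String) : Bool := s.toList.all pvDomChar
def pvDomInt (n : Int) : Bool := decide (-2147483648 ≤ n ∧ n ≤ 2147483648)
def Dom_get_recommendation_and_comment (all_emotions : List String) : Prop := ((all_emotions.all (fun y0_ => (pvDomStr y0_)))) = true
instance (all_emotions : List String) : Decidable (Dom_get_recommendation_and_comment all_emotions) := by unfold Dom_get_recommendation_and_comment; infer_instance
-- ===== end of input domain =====

-- B replaces A's Counter/max()/top_emotions/membership tie-break by one counting pass and
-- a strict-improvement argmax fold seeded with the last review's emotion (objective: simpler).

-- ===== PORT A =====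
def get_recommendation_and_comment (all_emotions : List String) : String × String × (List (String × Int)) :=
  if all_emotions = [] then
    ("N/A", "Please enter at least one review for analysis.", [])
  else
    let emotion_counts := PySem.Dict.counter all_emotions
    let max_count := (PySem.List.max? emotion_counts.values (fun v => v)).getD 0
    let top_emotions := (emotion_counts.items.filter (fun p => p.2 == max_count)).map (fun p => p.1)
    let dominant_emotion := top_emotions.headD ""
    let dominant_emotion :=
      if 1 < top_emotions.length then
        let last_review_emotion := (PySem.List.pyGet? all_emotions (-1)).getD ""
        if last_review_emotion ∈ top_emotions then last_review_emotion else dominant_emotion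
      else dominant_emotion
    let positive_buy_emotions := ["Joy", "Love"]
    let comment :=
      if dominant_emotion ∈ positive_buy_emotions then
        "**Recommendation: BUY!** The dominant sentiment is strongly positive (" ++ dominant_emotion ++ "), indicating a highly satisfied customer base. This is a strong indicator of product quality."
      else if dominant_emotion == "Surprise" then
        "**Recommendation: CAUTIOUS BUY.** The dominant sentiment is 'Surprise'. While positive, it suggests a wide range of unexpected outcomes. Review customer feedback carefully."
      else
        "**Recommendation: DO NOT BUY.** The dominant sentiment is negative (" ++ dominant_emotion ++ "), suggesting significant customer dissatisfaction or potential product issues. Caution is advised."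
    (dominant_emotion, comment, emotion_counts.items)

-- ===== PORT B =====
def pvComment (dominant : String) : String :=
  if dominant ∈ ["Joy", "Love"] then
    "**Recommendation: BUY!** The dominant sentiment is strongly positive (" ++ dominant ++ "), indicating a highly satisfied customer base. This is a strong indicator of product quality."
  else if dominant == "Surprise" then
    "**Recommendation: CAUTIOUS BUY.** The dominant sentiment is 'Surprise'. While positive, it suggests a wide range of unexpected outcomes. Review customer feedback carefully."
  else
    "**Recommendation: DO NOT BUY.** The dominant sentiment is negative (" ++ dominant ++ "), suggesting significant customer dissatisfaction or potential product issues. Caution is advised."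

def get_recommendation_and_comment_alt (all_emotions : List String) : String × String × (List (String × Int)) :=
  if all_emotions = [] then
    ("N/A", "Please enter at least one review for analysis.", [])
  else
    let counts := all_emotions.foldl
      (fun d e => d.insert e (d.getD e 0 + 1)) PySem.Dict.empty
    -- argmax fold seeded with the last review's emotion; strict improvement only
    let last := (PySem.List.pyGet? all_emotions (-1)).getD ""
    let db := counts.items.foldl
      (fun (a : String × Int) q => if a.2 < q.2 then q else a)
      (last, counts.getD last 0)
    (db.1, pvComment db.1, counts.items)

-- ===== PRECONDITION & SPEC =====
def Spec_get_recommendation_and_comment (all_emotions : List String) (out : String × String × (List (String × Int))) : Prop := out = get_recommendation_and_comment_alt all_emotions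
instance (all_emotions : List String) (out : String × String × (List (String × Int))) : Decidable (Spec_get_recommendation_and_comment all_emotions out) := by unfold Spec_get_recommendation_and_comment; infer_instance

-- ===== CLAIM (what is proved, stated in full; the proofs are below) =====
def Claim_equal_get_recommendation_and_comment : Prop := ∀ (all_emotions : List String), Dom_get_recommendation_and_comment all_emotions → Spec_get_recommendation_and_comment all_emotions (get_recommendation_and_comment all_emotions)

-- ===== LEMMAS AND PROOFS =====

-- the argmax fold never moves once the bound is reached
theorem pv_fold_no_update : ∀ (l : List (String × Int)) (x0 : String) (b0 : Int),
    (∀ p ∈ l, p.2 ≤ b0) →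
    l.foldl (fun (a : String × Int) q => if a.2 < q.2 then q else a) (x0, b0) = (x0, b0) := by
  intro l
  induction l with
  | nil => intro x0 b0 _; rfl
  | cons q l ih =>
    intro x0 b0 h
    have hq : q.2 ≤ b0 := h q (by simp)
    rw [List.foldl_cons, if_neg (by omega)]
    exact ih x0 b0 (fun p hp => h p (by simp [hp]))

-- characterisation of the seeded strict-improvement argmax fold
theorem pv_fold_argmax : ∀ (l : List (String × Int)) (x0 : String) (b0 M : Int),
    (∀ p ∈ l, p.2 ≤ M) → b0 ≤ M → (b0 = M ∨ ∃ p ∈ l, p.2 = M) →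
    (l.foldl (fun (a : String × Int) q => if a.2 < q.2 then q else a) (x0, b0)).1
      = if b0 = M then x0 else ((l.find? (fun p => p.2 == M)).getD ("", 0)).1 := by
  intro l
  induction l with
  | nil =>
    intro x0 b0 M _ _ hw
    rcases hw with h | ⟨p, hp, _⟩
    · simp [h]
    · simp at hp
  | cons q l ih =>
    intro x0 b0 M hle hb0 hw
    have hqM : q.2 ≤ M := hle q (by simp)
    by_cases hb : b0 = M
    · subst hb
      rw [List.foldl_cons, if_neg (by omega),
          pv_fold_no_update l x0 b0 (fun p hp => hle p (by simp [hp]))]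
      simp
    · have hblt : b0 < M := lt_of_le_of_ne hb0 hb
      rw [if_neg hb]
      by_cases hq : q.2 = M
      · rw [List.foldl_cons, if_pos (by omega),
            pv_fold_no_update l q.1 q.2 (fun p hp => by rw [hq]; exact hle p (by simp [hp]))]
        have : (fun p : String × Int => p.2 == M) q = true := by simp [hq]
        rw [List.find?_cons_of_pos (p := fun p : String × Int => p.2 == M) this]
        rfl
      · have hwl : ∃ p ∈ l, p.2 = M := by
          rcases hw with h | ⟨p, hp, hpM⟩
          · exact absurd h hb
          · rcases List.mem_cons.mp hp with h | h
            · exact absurd (h ▸ hpM) hq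
            · exact ⟨p, h, hpM⟩
        have hql : q.2 < M := lt_of_le_of_ne hqM hq
        have hfind : ((q :: l).find? (fun p => p.2 == M)) = l.find? (fun p => p.2 == M) := by
          rw [List.find?_cons_of_neg (p := fun p : String × Int => p.2 == M) (by simp [hq])]
        rw [List.foldl_cons, hfind]
        have hlle : ∀ p ∈ l, p.2 ≤ M := fun p hp => hle p (by simp [hp])
        by_cases hstep : b0 < q.2
        · rw [if_pos hstep, ih q.1 q.2 M hlle (le_of_lt hql) (Or.inr hwl), if_neg hq]
        · rw [if_neg hstep, ih x0 b0 M hlle hb0 (Or.inr hwl), if_neg hb]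

-- the dominant emotions of the two ports coincide (A side, reduced to the find? form)
theorem pv_dominant_eq (xs : List String) (hxs : xs ≠ []) (M : Int) :
    (let top := (((PySem.Dict.counter xs).items.filter (fun p => p.2 == M)).map (fun p : String × Int => p.1));
     let L := (PySem.List.pyGet? xs (-1)).getD "";
     (if 1 < top.length then (if L ∈ top then L else top.headD "") else top.headD "")
       = (if (PySem.Dict.counter xs).getD L 0 == M then L
          else (((PySem.Dict.counter xs).items.find? (fun p => p.2 == M)).getD ("", 0)).1)) := by
  simp only
  set L := (PySem.List.pyGet? xs (-1)).getD "" with hLdef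
  have hLmem : L ∈ xs := by
    rw [hLdef, PySem.List.pyGet?_neg_one, List.getLast?_eq_some_getLast hxs]
    exact List.getLast_mem hxs
  rw [PySem.Dict.items_counter, List.filter_map, List.find?_map, List.map_map,
      PySem.Dict.getD_counter]
  have hid : ((fun p : String × Int => p.1) ∘ fun k => (k, (xs.count k : Int))) = id := rfl
  rw [hid, List.map_id]
  set S := PySem.Set.ofList xs with hSdef
  set q := ((fun p : String × Int => p.2 == M) ∘ fun k => (k, (xs.count k : Int))) with hqdef
  have hq : ∀ k, q k = ((xs.count k : Int) == M) := fun k => rfl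
  by_cases hM : (xs.count L : Int) = M
  · have hRHS : ((xs.count L : Int) == M) = true := by simp [hM]
    rw [hRHS, if_pos rfl]
    have hLS : L ∈ S := by rw [hSdef]; simp [pysem, hLmem]
    have hLtop : L ∈ S.filter q := List.mem_filter.mpr ⟨hLS, by rw [hq]; simp [hM]⟩
    by_cases hlen : 1 < (S.filter q).length
    · simp [hlen, hLtop]
    · have hlen1 : (S.filter q).length = 1 := by
        have h0 : 0 < (S.filter q).length := List.length_pos_of_mem hLtop
        omega
      obtain ⟨a, ha⟩ := List.length_eq_one_iff.mp hlen1
      have : a = L := by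
        have := hLtop; rw [ha] at this; exact (List.mem_singleton.mp this).symm
      rw [if_neg hlen, ha, this]
      rfl
  · have hRHS : ((xs.count L : Int) == M) = false := by simp [hM]
    rw [hRHS]
    simp only [Bool.false_eq_true, if_false]
    have hLnot : L ∉ S.filter q := by
      intro h
      have := (List.mem_filter.mp h).2
      rw [hq] at this
      exact hM (by simpa using this)
    have hL : (if 1 < (S.filter q).length then
        (if L ∈ S.filter q then L else (S.filter q).headD "") else (S.filter q).headD "")
        = (S.filter q).headD "" := by
      by_cases hlen : 1 < (S.filter q).length
      · rw [if_pos hlen, if_neg hLnot]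
      · rw [if_neg hlen]
    rw [hL, List.headD_eq_head?_getD, List.head?_filter]
    cases S.find? q with
    | none => rfl
    | some k => rfl

-- B's argmax fold equals the find? form with M := A's max_count
theorem pv_alt_dominant (xs : List String) (hxs : xs ≠ []) :
    (let counts := PySem.Dict.counter xs;
     let M := (PySem.List.max? counts.values (fun v => v)).getD 0;
     let L := (PySem.List.pyGet? xs (-1)).getD "";
     (counts.items.foldl (fun (a : String × Int) q => if a.2 < q.2 then q else a)
        (L, counts.getD L 0)).1
       = (if counts.getD L 0 == M then L
          else ((counts.items.find? (fun p => p.2 == M)).getD ("", 0)).1)) := by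
  simp only
  set counts := PySem.Dict.counter xs with hc
  set L := (PySem.List.pyGet? xs (-1)).getD "" with hLdef
  have hLmem : L ∈ xs := by
    rw [hLdef, PySem.List.pyGet?_neg_one, List.getLast?_eq_some_getLast hxs]
    exact List.getLast_mem hxs
  have hvals : counts.values ≠ [] := by
    rw [hc, PySem.Dict.values, PySem.Dict.items_counter]
    simp only [ne_eq, List.map_eq_nil_iff]
    intro h
    have hLS : L ∈ PySem.Set.ofList xs := by simp [pysem, hLmem]
    rw [h] at hLS
    simp at hLS
  obtain ⟨m, hm⟩ : ∃ m, PySem.List.max? counts.values (fun v => v) = some m := by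
    cases h : PySem.List.max? counts.values (fun v => v) with
    | none => exact absurd ((PySem.List.max?_eq_none_iff _ _).mp h) hvals
    | some m => exact ⟨m, rfl⟩
  rw [hm]
  simp only [Option.getD_some]
  have hmmem : m ∈ counts.values := PySem.List.max?_mem hm
  have hmax : ∀ y ∈ counts.values, y ≤ m := PySem.List.max?_isMax hm
  have hall : ∀ p ∈ counts.items, p.2 ≤ m := by
    intro p hp
    have : p.2 ∈ counts.values := by
      rw [PySem.Dict.values]; exact List.mem_map.mpr ⟨p, hp, rfl⟩
    exact hmax p.2 this
  have hwit : ∃ p ∈ counts.items, p.2 = m := by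
    rw [PySem.Dict.values] at hmmem
    obtain ⟨p, hp, hpm⟩ := List.mem_map.mp hmmem
    exact ⟨p, hp, hpm⟩
  have hseed : counts.getD L 0 ≤ m := by
    have : counts.getD L 0 = (xs.count L : Int) := by rw [hc, PySem.Dict.getD_counter]
    rw [this]
    have : ((L, (xs.count L : Int)) : String × Int) ∈ counts.items := by
      rw [hc, PySem.Dict.items_counter]
      simp only [List.mem_map]
      exact ⟨L, by simp [pysem, hLmem], rfl⟩
    exact hall _ this
  rw [pv_fold_argmax counts.items L (counts.getD L 0) m hall hseed (Or.inr hwit)]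
  by_cases h : counts.getD L 0 = m
  · simp [h]
  · have : (counts.getD L 0 == m) = false := by simp [h]
    simp [h, this]

-- ===== VERDICT (by name: the statement is the Claim_ definition above) =====
theorem get_recommendation_and_comment_spec : Claim_equal_get_recommendation_and_comment := by
  intro xs _
  unfold Spec_get_recommendation_and_comment get_recommendation_and_comment get_recommendation_and_comment_alt
  by_cases hxs : xs = []
  · simp [hxs]
  · simp only [if_neg hxs]
    rw [PySem.Dict.foldl_insert_getD_add_one_eq_counter]
    have hA := pv_dominant_eq xs hxs ((PySem.List.max? (PySem.Dict.counter xs).values (fun v => v)).getD 0)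
    have hB := pv_alt_dominant xs hxs
    simp only at hA hB
    rw [hB, ← hA]
    simp [pvComment]
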